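-- pv_equiv track=rewrite | github.com/nsm23/Ylab | home_work_2/task_1.py | short_way
-- ===== SOURCE A (Python) =====
-- def short_way(diff_ways: dict) -> (tuple, float):
--     """Поиск кратчайшего пути"""
--     min_road = 0
--     road = ()
--     data = []
--     for key, value in diff_ways.items():
--         s = sum(value)
--         data.append(s)
--         if s == min(data):
--             min_road = s
--             road = key
--     return road, min_road
-- ===== SOURCE B (Python) =====
-- def short_way(diff_ways: dict) -> (tuple, float):
--     """Поиск кратчайшего пути"""
--     sums = [(key, sum(value)) for key, value in diff_ways.items()]
--     if not sums:
--         return (), 0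
--     m = min(s for _, s in sums)
--     road = next(k for k, s in reversed(sums) if s == m)
--     return road, m
-- ===== Notes on version B (the rewrite author's own statement) =====
-- stated objective: simpler
-- what changed: Replaces A's online running-minimum scan that keeps a growing list and recomputes min(data) each iteration with a build-sums-table pass, one min, and one reversed search for the last key attaining it.
import Mathlib
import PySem

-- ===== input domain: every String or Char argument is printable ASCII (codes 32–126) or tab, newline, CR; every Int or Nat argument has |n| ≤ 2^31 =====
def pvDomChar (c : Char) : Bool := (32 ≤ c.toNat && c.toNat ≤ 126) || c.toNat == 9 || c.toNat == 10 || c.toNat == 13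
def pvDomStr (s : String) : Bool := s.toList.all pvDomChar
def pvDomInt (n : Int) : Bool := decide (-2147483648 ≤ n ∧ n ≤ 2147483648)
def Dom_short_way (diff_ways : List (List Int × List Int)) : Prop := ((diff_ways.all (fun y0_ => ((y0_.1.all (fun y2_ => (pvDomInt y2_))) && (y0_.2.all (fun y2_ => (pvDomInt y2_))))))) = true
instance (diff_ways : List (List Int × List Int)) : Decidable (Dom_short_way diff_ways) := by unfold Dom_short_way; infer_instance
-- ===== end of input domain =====

-- B replaces A's online running-minimum scan (which recomputes min over a growing list each
-- iteration) by a sums table, one min, and one reversed search for the last minimal key; simpler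
-- decomposition and asymptotically faster in the number of keys.


-- ===== PORT A =====
-- loop body of A's for-loop: state = (min_road, (road, data))
def shortWayStepA (st : Int × (List Int × List Int)) (kv : List Int × List Int) :
    Int × (List Int × List Int) :=
  let s := kv.2.sum
  let data := st.2.2 ++ [s]
  if s == (PySem.List.min? data (fun x => x)).getD 0 then (s, (kv.1, data))
  else (st.1, (st.2.1, data))

def short_way (diff_ways : List (List Int × List Int)) : List Int × Int :=
  let r := diff_ways.foldl shortWayStepA (0, ([], []))
  (r.2.1, r.1)

-- ===== PORT B =====
def short_way_alt (diff_ways : List (List Int × List Int)) : List Int × Int :=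
  let sums := diff_ways.map (fun kv => (kv.1, kv.2.sum))
  match sums with
  | [] => ([], 0)
  | _ :: _ =>
    let m := (PySem.List.min? (sums.map (fun p => p.2)) (fun x => x)).getD 0
    let road := ((sums.reverse.find? (fun p => p.2 == m)).getD ([], 0)).1
    (road, m)

-- ===== PRECONDITION & SPEC =====
def Spec_short_way (diff_ways : List (List Int × List Int)) (out : List Int × Int) : Prop := out = short_way_alt diff_ways
instance (diff_ways : List (List Int × List Int)) (out : List Int × Int) : Decidable (Spec_short_way diff_ways out) := by unfold Spec_short_way; infer_instance

-- ===== CLAIM (what is proved, stated in full; the proofs are below) =====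
def Claim_equal_short_way : Prop := ∀ (diff_ways : List (List Int × List Int)), Dom_short_way diff_ways → Spec_short_way diff_ways (short_way diff_ways)

-- ===== LEMMAS AND PROOFS =====

-- the per-key sums table, its value column, the global minimum, the last minimal key
def swSums (l : List (List Int × List Int)) : List (List Int × Int) :=
  l.map (fun kv => (kv.1, kv.2.sum))
def swData (l : List (List Int × List Int)) : List Int := (swSums l).map (fun p => p.2)
def swMv (l : List (List Int × List Int)) : Int :=
  (PySem.List.min? (swData l) (fun x => x)).getD 0
def swRd (l : List (List Int × List Int)) : List Int :=
  (((swSums l).reverse.find? (fun p => p.2 == swMv l)).getD ([], 0)).1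

theorem sw_min_getD_append (xs : List Int) (s : Int) :
    (PySem.List.min? (xs ++ [s]) (fun x => x)).getD 0 =
      if xs = [] then s else min ((PySem.List.min? xs (fun x => x)).getD 0) s := by
  cases xs with
  | nil => simp [PySem.List.min?_id_cons]
  | cons c t =>
    simp [PySem.List.min?_id_cons, List.foldl_append]

theorem swData_append (l : List (List Int × List Int)) (x : List Int × List Int) :
    swData (l ++ [x]) = swData l ++ [x.2.sum] := by
  simp [swData, swSums]

theorem swData_nil_iff (l : List (List Int × List Int)) : swData l = [] ↔ l = [] := by
  simp [swData, swSums]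

theorem foldA_char (l : List (List Int × List Int)) :
    l.foldl shortWayStepA (0, ([], [])) = (swMv l, (swRd l, swData l)) := by
  induction l using List.reverseRecOn with
  | nil => simp [swMv, swRd, swData, swSums, PySem.List.min?]
  | append_singleton l x ih =>
    rw [List.foldl_append, ih]
    have hdata : swData (l ++ [x]) = swData l ++ [x.2.sum] := swData_append l x
    have hrev : (swSums (l ++ [x])).reverse = (x.1, x.2.sum) :: (swSums l).reverse := by
      simp [swSums]
    simp only [List.foldl_cons, List.foldl_nil, shortWayStepA]
    rw [sw_min_getD_append]
    by_cases hl : l = []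
    · subst hl
      have h1 : swMv [x] = x.2.sum := by
        simp [swMv, swData, swSums, PySem.List.min?_id_cons]
      have h2 : swRd [x] = x.1 := by simp [swRd, swSums, h1]
      simp [swData, swSums, h1, h2]
    · have hne : swData l ≠ [] := fun h => hl ((swData_nil_iff l).mp h)
      rw [if_neg hne,
        show ((PySem.List.min? (swData l) (fun x => x)).getD 0) = swMv l from rfl]
      have hmv : swMv (l ++ [x]) = min (swMv l) x.2.sum := by
        rw [swMv, hdata, sw_min_getD_append, if_neg hne]; rfl
      by_cases hle : x.2.sum ≤ swMv l
      · rw [if_pos (by simp [min_eq_right hle])]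
        have hm : swMv (l ++ [x]) = x.2.sum := by rw [hmv, min_eq_right hle]
        have hr : swRd (l ++ [x]) = x.1 := by rw [swRd, hrev, hm]; simp
        rw [hm, hr, hdata]
      · have hlt : swMv l < x.2.sum := lt_of_not_ge hle
        rw [if_neg (by simp [min_eq_left hlt.le]; omega)]
        have hm : swMv (l ++ [x]) = swMv l := by rw [hmv, min_eq_left hlt.le]
        have hr : swRd (l ++ [x]) = swRd l := by
          rw [swRd, hrev, hm, List.find?_cons]
          have hb : ((x.1, x.2.sum).2 == swMv l) = false := by simp; omega
          rw [hb]; rfl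
        rw [hm, hr, hdata]

theorem alt_char (l : List (List Int × List Int)) :
    short_way_alt l = (swRd l, swMv l) := by
  cases l with
  | nil => simp [short_way_alt, swRd, swMv, swData, swSums, PySem.List.min?]
  | cons h t => rfl

-- ===== VERDICT (by name: the statement is the Claim_ definition above) =====
theorem short_way_spec : Claim_equal_short_way := by
  intro l _
  show short_way l = short_way_alt l
  rw [short_way, alt_char]
  simp [foldA_char]
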